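-- pv_equiv track=rewrite | github.com/Jasson-01/UBA-IP-2024 | Parciales_Python/Parcial-9/problema3.py | racha_mas_larga
-- ===== SOURCE A (Python) =====
-- def racha_mas_larga(tiempos: list[int]) -> tuple[int, int]:
--
--     # 1era parte
--     copia_tiempos = tiempos.copy()
--     comienza_indice = 0
--     lista_subsecuencias = []
--     subsecuencia = []
--     indice_actual = 0
--
--     # Recorro la copia
--     while indice_actual < len(copia_tiempos):
--         tiempo = copia_tiempos[indice_actual]
--
--         if tiempo != 0 and tiempo != 61:
--             if len(subsecuencia) == 0:
--                 comienza_indice = indice_actual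
--             subsecuencia.append(tiempo)
--         else:
--             if len(subsecuencia) > 0:
--                 lista_subsecuencias.append(
--                     ((comienza_indice, indice_actual - 1), subsecuencia))
--                 subsecuencia = []
--
--         indice_actual += 1
--
--     if len(subsecuencia) > 0:
--         lista_subsecuencias.append(
--             ((comienza_indice, indice_actual - 1), subsecuencia))
--
-- #    return lista_subsecuencias
--
--     # 2DA parte
--     # Ahora busco la longitud de la subsecuencia mas grande
--     tupla_res = (0, 0)
--    # maximo = []
--     longitud_maxima = 0
--     for (indices, subsecuencias) in lista_subsecuencias:
--         if longitud_maxima <= len(subsecuencias):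
--             #   maximo = lista_subsecuencias[i][1]
--             longitud_maxima = len(subsecuencias)
--             tupla_res = indices
--     return tupla_res
-- ===== SOURCE B (Python) =====
-- def racha_mas_larga(tiempos: list[int]) -> tuple[int, int]:
--     best = (0, 0)
--     best_len = 0
--     cur_start = 0
--     cur_len = 0
--     for i, t in enumerate(tiempos):
--         if t != 0 and t != 61:
--             if cur_len == 0:
--                 cur_start = i
--             cur_len += 1
--         else:
--             if cur_len > 0 and best_len <= cur_len:
--                 best = (cur_start, i - 1)
--                 best_len = cur_len
--             cur_len = 0
--     if cur_len > 0 and best_len <= cur_len: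
--         best = (cur_start, len(tiempos) - 1)
--     return best
-- ===== Notes on version B (the rewrite author's own statement) =====
-- stated objective: simpler
-- what changed: Replaces A's two-phase design (build a list of all runs with their index ranges and contents, then scan that list for the last longest one) with one linear pass keeping only cur_start/cur_len and the best range so far, never materialising the runs.
import Mathlib
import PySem

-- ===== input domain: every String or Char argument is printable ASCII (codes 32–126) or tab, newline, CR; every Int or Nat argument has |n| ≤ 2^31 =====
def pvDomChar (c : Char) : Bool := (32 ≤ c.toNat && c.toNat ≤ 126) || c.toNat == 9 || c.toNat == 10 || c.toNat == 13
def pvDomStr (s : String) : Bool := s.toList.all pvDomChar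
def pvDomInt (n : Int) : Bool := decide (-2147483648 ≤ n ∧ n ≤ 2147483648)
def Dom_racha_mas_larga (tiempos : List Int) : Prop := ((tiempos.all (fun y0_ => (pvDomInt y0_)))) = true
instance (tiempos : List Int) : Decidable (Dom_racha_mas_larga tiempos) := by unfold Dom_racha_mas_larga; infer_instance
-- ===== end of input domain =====

-- B fuses A's two phases (collect all runs, then pick the last longest) into one O(1)-space pass; totally equivalent.

-- ===== PORT A =====
-- phase 1: the while loop, consuming the copy element by element while carrying
-- indice_actual, comienza_indice, the accumulated lista_subsecuencias and the current subsecuencia;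
-- the trailing "if len(subsecuencia) > 0" append is the nil case.
def pvPass1 : List Int → Int → Int → List ((Int × Int) × List Int) → List Int → List ((Int × Int) × List Int)
  | [], i, start, acc, sub =>
      if sub.length > 0 then acc ++ [((start, i - 1), sub)] else acc
  | t :: rest, i, start, acc, sub =>
      if t ≠ 0 ∧ t ≠ 61 then
        pvPass1 rest (i + 1) (if sub.length = 0 then i else start) acc (sub ++ [t])
      else
        if sub.length > 0 then
          pvPass1 rest (i + 1) start (acc ++ [((start, i - 1), sub)]) []
        else
          pvPass1 rest (i + 1) start acc []

-- phase 2 step: the body of A's for loop over lista_subsecuencias, state (tupla_res, longitud_maxima)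
def pvPass2Step (st : (Int × Int) × Int) (run : (Int × Int) × List Int) : (Int × Int) × Int :=
  if st.2 ≤ (run.2.length : Int) then (run.1, (run.2.length : Int)) else st

def racha_mas_larga (tiempos : List Int) : Int × Int :=
  ((pvPass1 tiempos 0 0 [] []).foldl pvPass2Step ((0, 0), 0)).1

-- ===== PORT B =====
-- single pass: index i, cur_start cs, cur_len cl, best, best_len bl; the nil case is the trailing close.
def pvLoopB : List Int → Int → Int → Int → (Int × Int) → Int → Int × Int
  | [], i, cs, cl, best, bl =>
      if cl > 0 ∧ bl ≤ cl then (cs, i - 1) else best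
  | t :: rest, i, cs, cl, best, bl =>
      if t ≠ 0 ∧ t ≠ 61 then
        pvLoopB rest (i + 1) (if cl = 0 then i else cs) (cl + 1) best bl
      else
        if cl > 0 ∧ bl ≤ cl then
          pvLoopB rest (i + 1) cs 0 (cs, i - 1) cl
        else
          pvLoopB rest (i + 1) cs 0 best bl

def racha_mas_larga_alt (tiempos : List Int) : Int × Int :=
  pvLoopB tiempos 0 0 0 (0, 0) 0

-- ===== PRECONDITION & SPEC =====
def Spec_racha_mas_larga (tiempos : List Int) (out : Int × Int) : Prop := out = racha_mas_larga_alt tiempos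
instance (tiempos : List Int) (out : Int × Int) : Decidable (Spec_racha_mas_larga tiempos out) := by unfold Spec_racha_mas_larga; infer_instance

-- ===== CLAIM (what is proved, stated in full; the proofs are below) =====
def Claim_equal_racha_mas_larga : Prop := ∀ (tiempos : List Int), Dom_racha_mas_larga tiempos → Spec_racha_mas_larga tiempos (racha_mas_larga tiempos)

-- ===== LEMMAS AND PROOFS =====

theorem pvPass1_acc (rest : List Int) (i start : Int) (acc : List ((Int × Int) × List Int))
    (sub : List Int) :
    pvPass1 rest i start acc sub = acc ++ pvPass1 rest i start [] sub := by
  induction rest generalizing i start acc sub with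
  | nil => simp [pvPass1]; split <;> simp
  | cons t rest ih =>
      simp only [pvPass1]
      split
      · rw [ih, ih (acc := [])]
      · split
        · simp only [List.nil_append]
          rw [ih (acc := acc ++ [((start, i - 1), sub)]), ih (acc := [((start, i - 1), sub)])]
          simp
        · rw [ih, ih (acc := [])]

theorem pvFuse (rest : List Int) (i cs : Int) (sub : List Int) (best : Int × Int) (bl : Int) :
    ((pvPass1 rest i cs [] sub).foldl pvPass2Step (best, bl)).1
      = pvLoopB rest i cs (sub.length : Int) best bl := by
  induction rest generalizing i cs sub best bl with
  | nil =>
      simp only [pvPass1, pvLoopB]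
      by_cases h : sub.length > 0
      · have h' : ((sub.length : Int) > 0) := by exact_mod_cast h
        by_cases hb : bl ≤ (sub.length : Int)
        · simp [h, pvPass2Step, hb]
        · simp [h, pvPass2Step, hb]
      · have h0 : sub.length = 0 := by omega
        simp [h0]
  | cons t rest ih =>
      simp only [pvPass1, pvLoopB]
      by_cases hg : t ≠ 0 ∧ t ≠ 61
      · simp only [if_pos hg]
        rw [ih]
        by_cases h0 : sub.length = 0
        · simp [h0]
        · simp [h0]
      · simp only [if_neg hg]
        by_cases h : sub.length > 0
        · rw [if_pos h, pvPass1_acc]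
          simp only [List.nil_append, List.foldl_append, List.foldl_cons, List.foldl_nil,
            pvPass2Step]
          have h' : (0 : Int) < (sub.length : Int) := by exact_mod_cast h
          by_cases hb : bl ≤ (sub.length : Int)
          · rw [if_pos hb, ih]
            simp [hb]
            intro hsub
            subst hsub
            simp at h
          · rw [if_neg hb, ih]
            simp
            intro _ hb2
            exact absurd hb2 hb
        · have h0 : sub.length = 0 := by omega
          rw [if_neg h, ih]
          simp [h0]

-- ===== VERDICT (by name: the statement is the Claim_ definition above) =====
theorem racha_mas_larga_spec : Claim_equal_racha_mas_larga := by
  intro tiempos _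
  unfold Spec_racha_mas_larga racha_mas_larga racha_mas_larga_alt
  have := pvFuse tiempos 0 0 [] (0, 0) 0
  simpa using this
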